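-- pv_equiv track=rewrite | github.com/bigdig/Coursera | Coding the matrix/week1/politics_lab.py | bitter_rivals
-- ===== SOURCE A (Python) =====
-- def policy_compare(sen_a, sen_b, voting_dict):
--     """
--     Input: last names of sen_a and sen_b, and a voting dictionary mapping senator
--            names to lists representing their voting records.
--     Output: the dot-product (as a number) representing the degree of similarity
--             between two senators' voting policies
--     Example:
--         >>> voting_dict = {'Fox-Epstein':[-1,-1,-1,1],'Ravella':[1,1,1,1]}
--         >>> policy_compare('Fox-Epstein','Ravella', voting_dict)
--         -2
--     """
--     result = 0
--     for i in range(len(voting_dict[sen_a])):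
--         result += voting_dict[sen_a][i] * voting_dict[sen_b][i]
--     return result
--
-- def least_similar(sen, voting_dict):
--     """
--     Input: the last name of a senator, and a dictionary mapping senator names
--            to lists representing their voting records.
--     Output: the last name of the senator whose political mindset is least like the input
--             senator.
--     Example:
--         >>> vd = {'Klein': [1,1,1], 'Fox-Epstein': [1,-1,0], 'Ravella': [-1,0,0]}
--         >>> least_similar('Klein', vd)
--         'Ravella'
--     """
--     name = ""
--     compare = 10000
--     for i in voting_dict.keys():
--         if i != sen:
--             temp = policy_compare(sen, i, voting_dict)
--             if temp < compare:
--                 compare = temp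
--                 name = i
--     return name
--
-- def bitter_rivals(voting_dict):
--     """
--     Input: a dictionary mapping senator names to lists representing
--            their voting records
--     Output: a tuple containing the two senators who most strongly
--             disagree with one another.
--     Example:
--         >>> voting_dict = {'Klein': [-1,0,1], 'Fox-Epstein': [-1,-1,-1], 'Ravella': [0,0,1]}
--         >>> bitter_rivals(voting_dict)
--         ('Fox-Epstein', 'Ravella')
--     """
--     oponents = {}
--     compare = 100000
--     for i in voting_dict.keys():
--         oponents[i] = least_similar(i, voting_dict)
--     for i in oponents:
--         temp = policy_compare(i, oponents[i], voting_dict)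
--         if temp < compare:
--             compare = temp
--             names = (i, oponents[i])
--     return names
-- ===== SOURCE B (Python) =====
-- def bitter_rivals(voting_dict):
--     """One direct scan over unordered pairs i<j, keeping the running-minimum dot product."""
--     names = list(voting_dict.keys())
--     compare = 100000
--     for i in range(len(names)):
--         vi = voting_dict[names[i]]
--         for j in range(i + 1, len(names)):
--             vj = voting_dict[names[j]]
--             temp = sum(vi[k] * vj[k] for k in range(len(vi)))
--             if temp < compare:
--                 compare = temp
--                 result = (names[i], names[j])
--     return result
-- ===== Notes on version B (the rewrite author's own statement) =====
-- stated objective: simpler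
-- what changed: Replaced A's two-phase scheme (build a per-senator least-similar opponents table via least_similar, then reduce over it) by one direct scan over unordered index pairs i<j keeping a running minimum dot product; each pairwise dot is computed once instead of A's n(n-1)+n dot computations.
-- outside the precondition, e.g. on bitter_rivals({'': [2], 'x': [40000], 'y': [40000]}): A returns ('', ''), B returns ('', 'x'); on bitter_rivals({'': [1]}): A returns ('', ''), B raises UnboundLocalError
import Mathlib
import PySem

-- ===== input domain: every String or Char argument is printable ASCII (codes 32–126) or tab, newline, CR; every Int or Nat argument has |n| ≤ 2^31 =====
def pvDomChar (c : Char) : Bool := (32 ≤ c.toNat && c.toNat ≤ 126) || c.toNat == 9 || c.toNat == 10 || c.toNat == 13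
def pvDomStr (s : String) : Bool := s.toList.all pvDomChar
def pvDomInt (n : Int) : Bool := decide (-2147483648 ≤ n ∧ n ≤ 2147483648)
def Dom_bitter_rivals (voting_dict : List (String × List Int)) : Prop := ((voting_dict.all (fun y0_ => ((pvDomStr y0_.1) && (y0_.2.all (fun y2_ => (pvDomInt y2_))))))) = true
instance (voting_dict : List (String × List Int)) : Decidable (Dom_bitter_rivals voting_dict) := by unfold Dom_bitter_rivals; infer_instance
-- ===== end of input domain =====

-- B replaces A's opponents-table-then-reduce scheme by one direct running-minimum scan over
-- unordered pairs i<j, computing each pairwise dot product once (simpler decomposition).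

-- dot product of two vote vectors, sum(vi[k]*vj[k] for k in range(len(vi))) (shared by port B and Pre_)
def pvDot (xs ys : List Int) : Int :=
  (List.range xs.length).foldl (fun r k => r + xs.getD k 0 * ys.getD k 0) 0

-- ===== PORT A =====
def policy_compare_port (sen_a sen_b : String) (voting_dict : List (String × List Int)) : Int :=
  let va := PySem.Dict.getD ⟨voting_dict⟩ sen_a []
  let vb := PySem.Dict.getD ⟨voting_dict⟩ sen_b []
  (List.range va.length).foldl (fun result i => result + va.getD i 0 * vb.getD i 0) 0

def least_similar_port (sen : String) (voting_dict : List (String × List Int)) : String :=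
  ((PySem.Dict.keys ⟨voting_dict⟩).foldl (fun (st : Int × String) i =>
    if i ≠ sen then
      let temp := policy_compare_port sen i voting_dict
      if temp < st.1 then (temp, i) else st
    else st) (10000, "")).2

def bitter_rivals (voting_dict : List (String × List Int)) : String × String :=
  let oponents : PySem.Dict String String :=
    (PySem.Dict.keys ⟨voting_dict⟩).foldl
      (fun d i => d.insert i (least_similar_port i voting_dict)) PySem.Dict.empty
  ((PySem.Dict.keys oponents).foldl (fun (st : Int × Option (String × String)) i =>
      let temp := policy_compare_port i (PySem.Dict.getD oponents i "") voting_dict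
      if temp < st.1 then (temp, some (i, PySem.Dict.getD oponents i "")) else st)
    (100000, none)).2.getD ("", "")

-- ===== PORT B =====
def bitter_rivals_alt (voting_dict : List (String × List Int)) : String × String :=
  let names := PySem.Dict.keys ⟨voting_dict⟩
  ((List.range names.length).foldl (fun (st : Int × Option (String × String)) i =>
      let vi := PySem.Dict.getD ⟨voting_dict⟩ (names.getD i "") []
      (List.range' (i + 1) (names.length - (i + 1))).foldl
        (fun (st' : Int × Option (String × String)) j =>
          let vj := PySem.Dict.getD ⟨voting_dict⟩ (names.getD j "") []
          let temp := pvDot vi vj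
          if temp < st'.1 then (temp, some (names.getD i "", names.getD j "")) else st') st)
    (100000, none)).2.getD ("", "")

-- ===== PRECONDITION & SPEC =====
-- Pre_ excludes inputs where A raises (fewer than two senators: UnboundLocalError/KeyError;
-- unequal record lengths: IndexError) and inputs where some senator's every dot product with the
-- others reaches A's sentinel 10000 — there A's "" sentinel name leaks (KeyError, or an accidental
-- returned pair involving a senator literally named "" when "" is itself a key).
def Pre_bitter_rivals (voting_dict : List (String × List Int)) : Prop :=
  2 ≤ voting_dict.length ∧ (voting_dict.map Prod.fst).Nodup ∧
  (∀ p ∈ voting_dict, ∀ q ∈ voting_dict, p.2.length = q.2.length) ∧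
  (∀ p ∈ voting_dict, ∃ q ∈ voting_dict, q.1 ≠ p.1 ∧ pvDot p.2 q.2 < 10000)
instance (voting_dict : List (String × List Int)) : Decidable (Pre_bitter_rivals voting_dict) := by
  unfold Pre_bitter_rivals; infer_instance

def pvWitness_bitter_rivals : (List (String × List Int)) := [("a", [1, -1]), ("b", [-1, 1])]

def Spec_bitter_rivals (voting_dict : List (String × List Int)) (out : String × String) : Prop := out = bitter_rivals_alt voting_dict
instance (voting_dict : List (String × List Int)) (out : String × String) : Decidable (Spec_bitter_rivals voting_dict out) := by unfold Spec_bitter_rivals; infer_instance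

-- ===== CLAIM (what is proved, stated in full; the proofs are below) =====
def Claim_equal_bitter_rivals : Prop := ∀ (voting_dict : List (String × List Int)), Dom_bitter_rivals voting_dict → Pre_bitter_rivals voting_dict → Spec_bitter_rivals voting_dict (bitter_rivals voting_dict)

-- ===== LEMMAS AND PROOFS =====

-- running strict-minimum step and loop, shared shape of all three loops in A and B
def pvStep {γ : Type} (st p : Int × γ) : Int × γ := if p.1 < st.1 then p else st
def pvRun {γ : Type} (st : Int × γ) (L : List (Int × γ)) : Int × γ := L.foldl pvStep st

lemma pvRun_append {γ : Type} (st : Int × γ) (L1 L2 : List (Int × γ)) :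
    pvRun st (L1 ++ L2) = pvRun (pvRun st L1) L2 := List.foldl_append

lemma pvRun_of_ge {γ : Type} (st : Int × γ) (L : List (Int × γ))
    (h : ∀ q ∈ L, st.1 ≤ q.1) : pvRun st L = st := by
  induction L with
  | nil => rfl
  | cons p t ih =>
    have hp := h p (List.mem_cons_self)
    simp only [pvRun, List.foldl_cons, pvStep, if_neg (not_lt.mpr hp)]
    exact ih fun q hq => h q (List.mem_cons_of_mem _ hq)

lemma pvRun_fst_gt {γ : Type} (c : Int) (st : Int × γ) (L : List (Int × γ))
    (h0 : c < st.1) (h : ∀ q ∈ L, c < q.1) : c < (pvRun st L).1 := by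
  induction L generalizing st with
  | nil => exact h0
  | cons p t ih =>
    simp only [pvRun, List.foldl_cons, pvStep]
    split
    · exact ih _ (h p List.mem_cons_self) fun q hq => h q (List.mem_cons_of_mem _ hq)
    · exact ih _ h0 fun q hq => h q (List.mem_cons_of_mem _ hq)

lemma pvRun_exact {γ : Type} (st : Int × γ) (L1 L2 : List (Int × γ)) (p : Int × γ)
    (h1 : ∀ q ∈ L1, p.1 < q.1) (h2 : ∀ q ∈ L2, p.1 ≤ q.1) (h0 : p.1 < st.1) :
    pvRun st (L1 ++ p :: L2) = p := by
  rw [pvRun_append]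
  have hgt : p.1 < (pvRun st L1).1 := pvRun_fst_gt _ _ _ h0 h1
  show pvRun (pvStep (pvRun st L1) p) L2 = p
  rw [pvStep, if_pos hgt]
  exact pvRun_of_ge p L2 h2

lemma pvRun_mem {γ : Type} (st : Int × γ) (L : List (Int × γ)) :
    pvRun st L = st ∨ pvRun st L ∈ L := by
  induction L generalizing st with
  | nil => exact Or.inl rfl
  | cons p t ih =>
    simp only [pvRun] at ih ⊢
    simp only [List.foldl_cons, pvStep]
    split
    · rcases ih p with h | h
      · rw [h]; exact Or.inr List.mem_cons_self
      · exact Or.inr (List.mem_cons_of_mem _ h)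
    · rcases ih st with h | h
      · exact Or.inl h
      · exact Or.inr (List.mem_cons_of_mem _ h)

lemma pvRun_fst_le_init {γ : Type} (st : Int × γ) (L : List (Int × γ)) :
    (pvRun st L).1 ≤ st.1 := by
  induction L generalizing st with
  | nil => exact le_refl _
  | cons p t ih =>
    simp only [pvRun, List.foldl_cons] at ih ⊢
    refine le_trans (ih (pvStep st p)) ?_
    simp only [pvStep]; split <;> omega

lemma pvRun_fst_le {γ : Type} (st : Int × γ) (L : List (Int × γ)) :
    ∀ q ∈ L, (pvRun st L).1 ≤ q.1 := by
  induction L generalizing st with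
  | nil => intro q hq; cases hq
  | cons p t ih =>
    intro q hq
    rcases List.mem_cons.mp hq with rfl | hq
    · refine le_trans (pvRun_fst_le_init (pvStep st q) t) ?_
      simp only [pvStep]; split <;> omega
    · exact ih (pvStep st p) q hq

-- dot-product bridges
lemma foldl_add_map_sum {α : Type} (f : α → Int) (l : List α) :
    l.foldl (fun r x => r + f x) 0 = (l.map f).sum := by
  rw [List.sum_eq_foldl, List.foldl_map]

lemma pvDot_eq_range (xs ys : List Int) (_h : xs.length ≤ ys.length) :
    (List.range xs.length).foldl (fun r i => r + xs.getD i 0 * ys.getD i 0) 0 = pvDot xs ys := rfl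

lemma pvDot_eq_zip_sum (xs ys : List Int) (h : xs.length ≤ ys.length) :
    pvDot xs ys = ((xs.zip ys).map (fun p => p.1 * p.2)).sum := by
  rw [show pvDot xs ys
      = ((List.range xs.length).map (fun i => xs.getD i 0 * ys.getD i 0)).sum from
    foldl_add_map_sum (fun i => xs.getD i 0 * ys.getD i 0) (List.range xs.length)]
  congr 1
  apply List.ext_getElem
  · simp; omega
  · intro i h1 h2
    simp only [List.getElem_map, List.getElem_range, List.getElem_zip]
    have hx : i < xs.length := by simpa using h1
    have hy : i < ys.length := lt_of_lt_of_le hx h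
    rw [List.getD_eq_getElem xs 0 hx, List.getD_eq_getElem ys 0 hy]

lemma pvDot_comm (xs ys : List Int) (h : xs.length = ys.length) :
    pvDot xs ys = pvDot ys xs := by
  rw [pvDot_eq_zip_sum xs ys (le_of_eq h), pvDot_eq_zip_sum ys xs (ge_of_eq h)]
  congr 1
  apply List.ext_getElem
  · simp; omega
  · intro i h1 h2
    simp only [List.getElem_map, List.getElem_zip]
    exact mul_comm _ _

-- opponents-dict construction
lemma items_foldl_insert (f : String → String) (ks : List String) (d : PySem.Dict String String)
    (hnd : ks.Nodup) (hdis : ∀ a ∈ ks, d.contains a = false) :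
    (ks.foldl (fun d i => d.insert i (f i)) d).items = d.items ++ ks.map (fun a => (a, f a)) := by
  induction ks generalizing d with
  | nil => simp
  | cons a t ih =>
    have hca : d.contains a = false := hdis a List.mem_cons_self
    have hstep : (d.insert a (f a)).items = d.items ++ [(a, f a)] :=
      PySem.Dict.items_insert_of_not_contains d (f a) hca
    have hdis' : ∀ b ∈ t, (d.insert a (f a)).contains b = false := by
      intro b hb
      rw [PySem.Dict.contains_insert]
      have hba : b ≠ a := fun e => (List.nodup_cons.mp hnd).1 (e ▸ hb)
      simp [hba, hdis b (List.mem_cons_of_mem _ hb)]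
    simp only [List.foldl_cons]
    rw [ih (d.insert a (f a)) (List.nodup_cons.mp hnd).2 hdis', hstep]
    simp

-- lookup of a member of a nodup association list
lemma vec_entry (vd : List (String × List Int)) (hnd : (vd.map Prod.fst).Nodup)
    (pr : String × List Int) (hpr : pr ∈ vd) :
    PySem.Dict.getD (⟨vd⟩ : PySem.Dict String (List Int)) pr.1 [] = pr.2 := by
  have hget : PySem.Dict.get? (⟨vd⟩ : PySem.Dict String (List Int)) pr.1 = some pr.2 := by
    apply PySem.Dict.get?_of_mem_items
    · exact (show ((⟨vd⟩ : PySem.Dict String (List Int)).items = vd) from rfl) ▸ (by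
        cases pr; exact hpr)
    · exact hnd
  rw [PySem.Dict.getD_eq_get?_getD, hget]; rfl

-- names, vectors and pairwise dot products by index
def pvNm (vd : List (String × List Int)) (i : Nat) : String := (vd.map Prod.fst).getD i ""
def pvVec (vd : List (String × List Int)) (a : String) : List Int :=
  PySem.Dict.getD (⟨vd⟩ : PySem.Dict String (List Int)) a []
def pvD (vd : List (String × List Int)) (i j : Nat) : Int :=
  pvDot (pvVec vd (pvNm vd i)) (pvVec vd (pvNm vd j))

-- the pair list B scans, written explicitly
def pvLB (vd : List (String × List Int)) : List (Int × Option (String × String)) :=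
  (List.range vd.length).flatMap (fun i =>
    (List.range' (i + 1) (vd.length - (i + 1))).map (fun j =>
      (pvD vd i j, some (pvNm vd i, pvNm vd j))))

lemma pvNm_eq_getElem (vd : List (String × List Int)) (i : Nat) (h : i < vd.length) :
    pvNm vd i = (vd[i]).1 := by
  unfold pvNm
  rw [List.getD_eq_getElem _ _ (by simpa using h), List.getElem_map]

lemma vec_nm (vd : List (String × List Int)) (hnd : (vd.map Prod.fst).Nodup)
    (i : Nat) (h : i < vd.length) : pvVec vd (pvNm vd i) = (vd[i]).2 := by
  rw [pvNm_eq_getElem vd i h]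
  exact vec_entry vd hnd (vd[i]) (List.getElem_mem h)

lemma nm_inj (vd : List (String × List Int)) (hnd : (vd.map Prod.fst).Nodup)
    (i j : Nat) (hi : i < vd.length) (hj : j < vd.length)
    (h : pvNm vd i = pvNm vd j) : i = j := by
  rw [pvNm_eq_getElem vd i hi, pvNm_eq_getElem vd j hj] at h
  have hi' : i < (vd.map Prod.fst).length := by simpa using hi
  have hj' : j < (vd.map Prod.fst).length := by simpa using hj
  have : (vd.map Prod.fst)[i] = (vd.map Prod.fst)[j] := by
    rw [List.getElem_map, List.getElem_map]; exact h
  exact (List.Nodup.getElem_inj_iff hnd).mp this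

lemma mem_ks (vd : List (String × List Int)) (a : String) :
    a ∈ vd.map Prod.fst ↔ ∃ i, ∃ _h : i < vd.length, pvNm vd i = a := by
  rw [List.mem_iff_getElem]
  constructor
  · rintro ⟨i, hi, rfl⟩
    have hi' : i < vd.length := by simpa using hi
    exact ⟨i, hi', by rw [pvNm_eq_getElem vd i hi', List.getElem_map]⟩
  · rintro ⟨i, hi, rfl⟩
    exact ⟨i, by simpa using hi, by rw [pvNm_eq_getElem vd i hi, List.getElem_map]⟩

lemma len_vec_eq (vd : List (String × List Int)) (hnd : (vd.map Prod.fst).Nodup)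
    (hlen : ∀ p ∈ vd, ∀ q ∈ vd, p.2.length = q.2.length)
    (i j : Nat) (hi : i < vd.length) (hj : j < vd.length) :
    (pvVec vd (pvNm vd i)).length = (pvVec vd (pvNm vd j)).length := by
  rw [vec_nm vd hnd i hi, vec_nm vd hnd j hj]
  exact hlen (vd[i]) (List.getElem_mem hi) (vd[j]) (List.getElem_mem hj)

lemma pcp_eq_pvD (vd : List (String × List Int)) (hnd : (vd.map Prod.fst).Nodup)
    (hlen : ∀ p ∈ vd, ∀ q ∈ vd, p.2.length = q.2.length)
    (i j : Nat) (hi : i < vd.length) (hj : j < vd.length) :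
    policy_compare_port (pvNm vd i) (pvNm vd j) vd = pvD vd i j := by
  unfold policy_compare_port pvD
  exact pvDot_eq_range _ _ (le_of_eq (len_vec_eq vd hnd hlen i j hi hj))

lemma pvD_comm (vd : List (String × List Int)) (hnd : (vd.map Prod.fst).Nodup)
    (hlen : ∀ p ∈ vd, ∀ q ∈ vd, p.2.length = q.2.length)
    (i j : Nat) (hi : i < vd.length) (hj : j < vd.length) :
    pvD vd i j = pvD vd j i := by
  unfold pvD
  exact pvDot_comm _ _ (len_vec_eq vd hnd hlen i j hi hj)

lemma mem_pvLB (vd : List (String × List Int)) (x : Int × Option (String × String)) :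
    x ∈ pvLB vd ↔ ∃ i j, i < j ∧ j < vd.length ∧ x = (pvD vd i j, some (pvNm vd i, pvNm vd j)) := by
  unfold pvLB
  simp only [List.mem_flatMap, List.mem_map, List.mem_range, List.mem_range']
  constructor
  · rintro ⟨i, hi, j, ⟨t, ht, rfl⟩, rfl⟩
    exact ⟨i, i + 1 + 1 * t, by omega, by omega, rfl⟩
  · rintro ⟨i, j, hij, hj, rfl⟩
    exact ⟨i, by omega, j, ⟨j - (i + 1), by omega, by omega⟩, rfl⟩

lemma range'_split (s len q : Nat) (h1 : s ≤ q) (h2 : q < s + len) :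
    List.range' s len = List.range' s (q - s) ++ q :: List.range' (q + 1) (s + len - q - 1) := by
  have hl : len = (q - s) + ((s + len - q - 1) + 1) := by omega
  rw [hl, ← List.range'_append]
  congr 1
  rw [List.range'_succ]
  have h3 : s + 1 * (q - s) = q := by omega
  rw [h3]
  have h4 : s + (q - s + (s + len - q - 1 + 1)) - q - 1 = s + len - q - 1 := by omega
  rw [h4]

lemma range_split (p n : Nat) (h : p < n) :
    List.range n = List.range p ++ p :: List.range' (p + 1) (n - p - 1) := by
  rw [List.range_eq_range', List.range_eq_range',
    range'_split 0 n p (by omega) (by omega)]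
  have e1 : p - 0 = p := by omega
  have e2 : 0 + n - p - 1 = n - p - 1 := by omega
  rw [e1, e2]

lemma foldl_nested_eq_pvRun {α β γ : Type} (outer : List α) (inner : α → List β)
    (g : α → β → Int × γ) (st : Int × γ) :
    outer.foldl (fun s i => (inner i).foldl (fun s' j => pvStep s' (g i j)) s) st
      = pvRun st (outer.flatMap (fun i => (inner i).map (g i))) := by
  induction outer generalizing st with
  | nil => rfl
  | cons a t ih =>
    simp only [List.foldl_cons, List.flatMap_cons]
    rw [pvRun_append, ih]
    have hin : List.foldl (fun s' j => pvStep s' (g a j)) st (inner a)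
        = pvRun st (List.map (g a) (inner a)) := (List.foldl_map).symm
    rw [hin]

lemma B_eq_run (vd : List (String × List Int)) :
    bitter_rivals_alt vd = (pvRun (100000, (none : Option (String × String))) (pvLB vd)).2.getD ("", "") := by
  unfold pvLB
  rw [show vd.length = (vd.map Prod.fst).length from (List.length_map _).symm]
  exact congrArg (fun r : Int × Option (String × String) => r.2.getD ("", ""))
    (foldl_nested_eq_pvRun (List.range (vd.map Prod.fst).length)
      (fun i => List.range' (i + 1) ((vd.map Prod.fst).length - (i + 1)))
      (fun i j =>
        (pvDot (PySem.Dict.getD (⟨vd⟩ : PySem.Dict String (List Int)) ((vd.map Prod.fst).getD i "") [])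
               (PySem.Dict.getD (⟨vd⟩ : PySem.Dict String (List Int)) ((vd.map Prod.fst).getD j "") []),
         some ((vd.map Prod.fst).getD i "", (vd.map Prod.fst).getD j "")))
      (100000, none))

lemma LS_eq_run (vd : List (String × List Int)) (a : String) :
    least_similar_port a vd =
      (pvRun (10000, "")
        (((vd.map Prod.fst).filter (fun b => b ≠ a)).map
          (fun b => (policy_compare_port a b vd, b)))).2 := by
  unfold least_similar_port
  refine congrArg Prod.snd ?_
  rw [pvRun, List.foldl_map, List.foldl_filter]
  refine PySem.List.foldl_congr_mem _ _ _ _ (fun acc x _ => ?_)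
  by_cases h : x = a
  · simp [h]
  · simp [h, pvStep]

lemma A_eq_run (vd : List (String × List Int)) (hnd : (vd.map Prod.fst).Nodup) :
    bitter_rivals vd =
      (pvRun (100000, (none : Option (String × String)))
        ((vd.map Prod.fst).map (fun a =>
          (policy_compare_port a (least_similar_port a vd) vd,
           some (a, least_similar_port a vd))))).2.getD ("", "") := by
  simp only [bitter_rivals]
  set ks := vd.map Prod.fst with hks
  set ops := (PySem.Dict.keys (⟨vd⟩ : PySem.Dict String (List Int))).foldl
    (fun d i => d.insert i (least_similar_port i vd)) PySem.Dict.empty with hops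
  have hitems : ops.items = ks.map (fun a => (a, least_similar_port a vd)) := by
    rw [hops, show PySem.Dict.keys (⟨vd⟩ : PySem.Dict String (List Int)) = ks from rfl]
    rw [items_foldl_insert (fun i => least_similar_port i vd) ks PySem.Dict.empty hnd
      (fun a _ => PySem.Dict.contains_empty a)]
    rfl
  have hkeys : PySem.Dict.keys ops = ks := by
    show ops.items.map Prod.fst = ks
    rw [hitems, List.map_map]
    simp [Function.comp_def]
  have hknd : (PySem.Dict.keys ops).Nodup := by rw [hkeys]; exact hnd
  have hget : ∀ aa ∈ ks, PySem.Dict.getD ops aa "" = least_similar_port aa vd := by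
    intro aa ha
    have hmem : (aa, least_similar_port aa vd) ∈ ops.items := by
      rw [hitems]; exact List.mem_map_of_mem ha
    rw [PySem.Dict.getD_eq_get?_getD, PySem.Dict.get?_of_mem_items ops hmem hknd]; rfl
  refine congrArg (fun r : Int × Option (String × String) => r.2.getD ("", "")) ?_
  rw [hkeys, pvRun]
  conv_rhs => rw [List.foldl_map]
  refine PySem.List.foldl_congr_mem _ _ _ _ (fun acc x hx => ?_)
  simp only [hget x hx]
  rfl

lemma LS_spec (vd : List (String × List Int)) (hnd : (vd.map Prod.fst).Nodup)
    (hlen : ∀ p ∈ vd, ∀ q ∈ vd, p.2.length = q.2.length)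
    (hsent : ∀ p ∈ vd, ∃ q ∈ vd, q.1 ≠ p.1 ∧ pvDot p.2 q.2 < 10000)
    (a : String) (ha : a ∈ vd.map Prod.fst) :
    least_similar_port a vd ∈ vd.map Prod.fst ∧ least_similar_port a vd ≠ a ∧
    ∀ b ∈ vd.map Prod.fst, b ≠ a →
      policy_compare_port a (least_similar_port a vd) vd ≤ policy_compare_port a b vd := by
  have hrun := LS_eq_run vd a
  set f : String → Int × String := fun b => (policy_compare_port a b vd, b) with hf
  set M : List (Int × String) := ((vd.map Prod.fst).filter (fun b => b ≠ a)).map f with hM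
  obtain ⟨pr, hpr, hpra⟩ := List.mem_map.mp ha
  obtain ⟨qr, hqr, hqa, hdot⟩ := hsent pr hpr
  have hbks : qr.1 ∈ vd.map Prod.fst := List.mem_map_of_mem hqr
  have hqa' : qr.1 ≠ a := by rw [← hpra]; exact hqa
  have hfb : f qr.1 ∈ M := List.mem_map_of_mem (List.mem_filter.mpr ⟨hbks, by simp [hqa']⟩)
  have hpc : policy_compare_port a qr.1 vd = pvDot pr.2 qr.2 := by
    unfold policy_compare_port
    rw [show PySem.Dict.getD (⟨vd⟩ : PySem.Dict String (List Int)) a [] = pr.2 from by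
      rw [← hpra]; exact vec_entry vd hnd pr hpr]
    rw [show PySem.Dict.getD (⟨vd⟩ : PySem.Dict String (List Int)) qr.1 [] = qr.2 from
      vec_entry vd hnd qr hqr]
    exact pvDot_eq_range _ _ (le_of_eq (hlen pr hpr qr hqr))
  have hlow : (f qr.1).1 < 10000 := by simpa [hf, hpc] using hdot
  have hrmem : pvRun (10000, "") M ∈ M := by
    rcases pvRun_mem (10000, "") M with he | hm
    · exfalso
      have hle := pvRun_fst_le (10000, "") M (f qr.1) hfb
      rw [he] at hle
      simp only at hle
      omega
    · exact hm
  obtain ⟨b0, hb0f, hb0e⟩ := List.mem_map.mp hrmem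
  have hb0ks : b0 ∈ vd.map Prod.fst := (List.mem_filter.mp hb0f).1
  have hb0a : b0 ≠ a := by simpa using (List.mem_filter.mp hb0f).2
  have hLS : least_similar_port a vd = b0 := by rw [hrun, ← hb0e]
  refine ⟨hLS ▸ hb0ks, hLS ▸ hb0a, ?_⟩
  intro b hbks2 hba
  have hfbM : f b ∈ M := List.mem_map_of_mem (List.mem_filter.mpr ⟨hbks2, by simp [hba]⟩)
  have h1 := pvRun_fst_le (10000, "") M (f b) hfbM
  rw [← hb0e] at h1
  rw [hLS]
  exact h1

theorem bitter_rivals_main (vd : List (String × List Int)) (hpre : Pre_bitter_rivals vd) :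
    bitter_rivals vd = bitter_rivals_alt vd := by
  classical
  obtain ⟨h2, hnd, hlen, hsent⟩ := hpre
  have hlenmap : (vd.map Prod.fst).length = vd.length := List.length_map _
  -- the minimum pair value m
  have h01 : (pvD vd 0 1, some (pvNm vd 0, pvNm vd 1)) ∈ pvLB vd :=
    (mem_pvLB vd _).mpr ⟨0, 1, by omega, by omega, rfl⟩
  have hVx : pvD vd 0 1 ∈ (pvLB vd).map Prod.fst := List.mem_map_of_mem h01
  have hVne : (pvLB vd).map Prod.fst ≠ [] := by
    intro h; rw [h] at hVx; cases hVx
  obtain ⟨m, hm⟩ : ∃ m, ((pvLB vd).map Prod.fst).min? = some m := by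
    cases hmin : ((pvLB vd).map Prod.fst).min? with
    | none => exact absurd (List.min?_eq_none_iff.mp hmin) hVne
    | some m => exact ⟨m, rfl⟩
  obtain ⟨hmmem, hmle⟩ := List.min?_eq_some_iff.mp hm
  have h_ge : ∀ i j, i < j → j < vd.length → m ≤ pvD vd i j := by
    intro i j hij hj
    exact hmle _ (List.mem_map_of_mem ((mem_pvLB vd _).mpr ⟨i, j, hij, hj, rfl⟩))
  have h_ge' : ∀ i j, i ≠ j → i < vd.length → j < vd.length → m ≤ pvD vd i j := by
    intro i j hne hi hj
    rcases lt_or_gt_of_ne hne with h | h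
    · exact h_ge i j h hj
    · rw [pvD_comm vd hnd hlen i j hi hj]; exact h_ge j i h hi
  obtain ⟨x, hxLB, hx1⟩ := List.mem_map.mp hmmem
  obtain ⟨i0, j0, hij0, hj0, rfl⟩ := (mem_pvLB vd x).mp hxLB
  -- least first index p, then least partner q
  have hexP : ∃ i, ∃ j, i < j ∧ j < vd.length ∧ pvD vd i j = m := ⟨i0, j0, hij0, hj0, hx1⟩
  set p := Nat.find hexP with hpdef
  have hpP : ∃ j, p < j ∧ j < vd.length ∧ pvD vd p j = m := Nat.find_spec hexP
  have hpmin : ∀ i, i < p → ¬ ∃ j, i < j ∧ j < vd.length ∧ pvD vd i j = m :=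
    fun i hi => Nat.find_min hexP hi
  have hexQ : ∃ j, p < j ∧ j < vd.length ∧ pvD vd p j = m := hpP
  set q := Nat.find hexQ with hqdef
  obtain ⟨hpq, hqn, hDpq⟩ : p < q ∧ q < vd.length ∧ pvD vd p q = m := Nat.find_spec hexQ
  have hqmin : ∀ j, j < q → ¬ (p < j ∧ j < vd.length ∧ pvD vd p j = m) :=
    fun j hj => Nat.find_min hexQ hj
  have hpn : p < vd.length := lt_trans hpq hqn
  have G1 : ∀ i j, i < j → j < vd.length → i < p → m < pvD vd i j := by
    intro i j hij hj hip
    rcases (h_ge i j hij hj).lt_or_eq with h | h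
    · exact h
    · exact absurd ⟨j, hij, hj, h.symm⟩ (hpmin i hip)
  have G1' : ∀ i j, i ≠ j → i < vd.length → j < vd.length → (i < p ∨ j < p) → m < pvD vd i j := by
    intro i j hne hi hj hor
    rcases lt_or_gt_of_ne hne with h | h
    · rcases hor with hh | hh
      · exact G1 i j h hj hh
      · exact G1 i j h hj (lt_trans h hh)
    · rw [pvD_comm vd hnd hlen i j hi hj]
      rcases hor with hh | hh
      · exact G1 j i h hi (lt_trans h hh)
      · exact G1 j i h hi hh
  have G2 : ∀ j, p < j → j < q → m < pvD vd p j := by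
    intro j h1 h2
    have hjn : j < vd.length := lt_trans h2 hqn
    rcases (h_ge p j h1 hjn).lt_or_eq with h | h
    · exact h
    · exact absurd ⟨h1, hjn, h.symm⟩ (hqmin j h2)
  have hm4 : m < 10000 := by
    have h0 : 0 < vd.length := by omega
    obtain ⟨qr, hqr, hqane, hdot⟩ := hsent (vd[0]) (List.getElem_mem h0)
    obtain ⟨i, hi, hnmi⟩ := (mem_ks vd (vd[0]).1).mp (List.mem_map_of_mem (List.getElem_mem h0))
    obtain ⟨j, hj, hnmj⟩ := (mem_ks vd qr.1).mp (List.mem_map_of_mem hqr)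
    have hij : i ≠ j := by
      intro h; rw [h, hnmj] at hnmi; exact hqane hnmi
    have hvi : pvVec vd (pvNm vd i) = (vd[0]).2 := by
      rw [hnmi]; exact vec_entry vd hnd (vd[0]) (List.getElem_mem h0)
    have hvj : pvVec vd (pvNm vd j) = qr.2 := by
      rw [hnmj]; exact vec_entry vd hnd qr hqr
    have hD : pvD vd i j = pvDot (vd[0]).2 qr.2 := by unfold pvD; rw [hvi, hvj]
    have := h_ge' i j hij hi hj
    omega
  have hm5 : m < 100000 := by omega
  -- B returns the lexicographically first minimal pair
  have hB : bitter_rivals_alt vd = (pvNm vd p, pvNm vd q) := by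
    rw [B_eq_run vd]
    have hsplit : pvRun (100000, (none : Option (String × String))) (pvLB vd)
        = (pvD vd p q, some (pvNm vd p, pvNm vd q)) := by
      have hLB : pvLB vd =
          ((List.range p).flatMap (fun i => (List.range' (i + 1) (vd.length - (i + 1))).map
              (fun j => (pvD vd i j, some (pvNm vd i, pvNm vd j)))) ++
            (List.range' (p + 1) (q - p - 1)).map
              (fun j => (pvD vd p j, some (pvNm vd p, pvNm vd j)))) ++
          (pvD vd p q, some (pvNm vd p, pvNm vd q)) ::
          ((List.range' (q + 1) (vd.length - q - 1)).map
              (fun j => (pvD vd p j, some (pvNm vd p, pvNm vd j))) ++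
            (List.range' (p + 1) (vd.length - p - 1)).flatMap
              (fun i => (List.range' (i + 1) (vd.length - (i + 1))).map
                (fun j => (pvD vd i j, some (pvNm vd i, pvNm vd j))))) := by
        unfold pvLB
        rw [range_split p vd.length hpn, List.flatMap_append, List.flatMap_cons]
        rw [range'_split (p + 1) (vd.length - (p + 1)) q (by omega) (by omega),
          List.map_append, List.map_cons]
        have e1 : q - (p + 1) = q - p - 1 := by omega
        have e2 : p + 1 + (vd.length - (p + 1)) - q - 1 = vd.length - q - 1 := by omega
        rw [e1, e2]
        simp [List.append_assoc]
      rw [hLB]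
      apply pvRun_exact
      · intro y hy
        show pvD vd p q < y.1
        rw [hDpq]
        rcases List.mem_append.mp hy with hy | hy
        · obtain ⟨i, hir, hrow⟩ := List.mem_flatMap.mp hy
          obtain ⟨j, hjr, rfl⟩ := List.mem_map.mp hrow
          have hip : i < p := List.mem_range.mp hir
          obtain ⟨t, ht, rfl⟩ := List.mem_range'.mp hjr
          exact G1 i (i + 1 + 1 * t) (by omega) (by omega) hip
        · obtain ⟨j, hjr, rfl⟩ := List.mem_map.mp hy
          obtain ⟨t, ht, rfl⟩ := List.mem_range'.mp hjr
          exact G2 (p + 1 + 1 * t) (by omega) (by omega)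
      · intro y hy
        show pvD vd p q ≤ y.1
        rw [hDpq]
        rcases List.mem_append.mp hy with hy | hy
        · obtain ⟨j, hjr, rfl⟩ := List.mem_map.mp hy
          obtain ⟨t, ht, rfl⟩ := List.mem_range'.mp hjr
          exact h_ge p (q + 1 + 1 * t) (by omega) (by omega)
        · obtain ⟨i, hir, hrow⟩ := List.mem_flatMap.mp hy
          obtain ⟨j, hjr, rfl⟩ := List.mem_map.mp hrow
          obtain ⟨t1, ht1, rfl⟩ := List.mem_range'.mp hir
          obtain ⟨t, ht, rfl⟩ := List.mem_range'.mp hjr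
          exact h_ge _ _ (by omega) (by omega)
      · show pvD vd p q < (100000 : Int)
        rw [hDpq]; omega
    rw [hsplit]
    rfl
  -- least_similar at index p picks exactly the partner q
  have hnmqp : pvNm vd q ≠ pvNm vd p := by
    intro h; exact absurd (nm_inj vd hnd q p hqn hpn h) (by omega)
  have hksq : q < (vd.map Prod.fst).length := by omega
  have hget_q : (vd.map Prod.fst)[q] = pvNm vd q := by
    rw [pvNm_eq_getElem vd q hqn, List.getElem_map]
  have hLSp : least_similar_port (pvNm vd p) vd = pvNm vd q := by
    rw [LS_eq_run vd (pvNm vd p)]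
    have hks : vd.map Prod.fst
        = (vd.map Prod.fst).take q ++ pvNm vd q :: (vd.map Prod.fst).drop (q + 1) := by
      conv_lhs => rw [← List.take_append_drop q (vd.map Prod.fst),
        List.drop_eq_getElem_cons hksq]
      rw [hget_q]
    rw [hks, List.filter_append, List.filter_cons, if_pos (by simp [hnmqp]),
      List.map_append, List.map_cons]
    have hrex : pvRun (10000, "")
        (((((vd.map Prod.fst).take q).filter (fun b => b ≠ pvNm vd p)).map
            (fun b => (policy_compare_port (pvNm vd p) b vd, b))) ++
          (policy_compare_port (pvNm vd p) (pvNm vd q) vd, pvNm vd q) ::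
          ((((vd.map Prod.fst).drop (q + 1)).filter (fun b => b ≠ pvNm vd p)).map
            (fun b => (policy_compare_port (pvNm vd p) b vd, b))))
        = (policy_compare_port (pvNm vd p) (pvNm vd q) vd, pvNm vd q) := by
      apply pvRun_exact
      · intro y hy
        show policy_compare_port (pvNm vd p) (pvNm vd q) vd < y.1
        rw [pcp_eq_pvD vd hnd hlen p q hpn hqn, hDpq]
        obtain ⟨b, hbf, rfl⟩ := List.mem_map.mp hy
        have hbt := (List.mem_filter.mp hbf).1
        have hbp : b ≠ pvNm vd p := by simpa using (List.mem_filter.mp hbf).2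
        obtain ⟨j, hjq, hjb⟩ := List.mem_take_iff_getElem.mp hbt
        have hjq' : j < q := lt_of_lt_of_le hjq (min_le_left _ _)
        have hjn : j < vd.length := by omega
        have hbj : b = pvNm vd j := by
          rw [← hjb, pvNm_eq_getElem vd j hjn, List.getElem_map]
        have hjp : j ≠ p := by
          intro h; rw [hbj, h] at hbp; exact hbp rfl
        show m < (policy_compare_port (pvNm vd p) b vd, b).1
        rw [show ((policy_compare_port (pvNm vd p) b vd, b).1 = policy_compare_port (pvNm vd p) b vd) from rfl,
          hbj, pcp_eq_pvD vd hnd hlen p j hpn hjn]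
        rcases Nat.lt_or_ge j p with h | h
        · exact G1' p j (by omega) hpn hjn (Or.inr h)
        · exact G2 j (by omega) hjq'
      · intro y hy
        show policy_compare_port (pvNm vd p) (pvNm vd q) vd ≤ y.1
        rw [pcp_eq_pvD vd hnd hlen p q hpn hqn, hDpq]
        obtain ⟨b, hbf, rfl⟩ := List.mem_map.mp hy
        have hbks : b ∈ vd.map Prod.fst :=
          List.mem_of_mem_drop (List.mem_of_mem_filter hbf)
        have hbp : b ≠ pvNm vd p := by simpa using (List.mem_filter.mp hbf).2
        obtain ⟨j, hjn, hbj⟩ := (mem_ks vd b).mp hbks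
        have hjp : j ≠ p := by
          intro h; rw [← hbj, h] at hbp; exact hbp rfl
        show m ≤ (policy_compare_port (pvNm vd p) b vd, b).1
        rw [show ((policy_compare_port (pvNm vd p) b vd, b).1 = policy_compare_port (pvNm vd p) b vd) from rfl,
          ← hbj, pcp_eq_pvD vd hnd hlen p j hpn hjn]
        exact h_ge' p j (by omega) hpn hjn
      · show policy_compare_port (pvNm vd p) (pvNm vd q) vd < (10000 : Int)
        rw [pcp_eq_pvD vd hnd hlen p q hpn hqn, hDpq]; omega
    rw [hrex]
  -- per-senator values of A's outer loop
  have hval : ∀ i, i < vd.length →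
      m ≤ policy_compare_port (pvNm vd i) (least_similar_port (pvNm vd i) vd) vd ∧
      (i < p → m < policy_compare_port (pvNm vd i) (least_similar_port (pvNm vd i) vd) vd) := by
    intro i hi
    have hia : pvNm vd i ∈ vd.map Prod.fst := (mem_ks vd _).mpr ⟨i, hi, rfl⟩
    obtain ⟨hLSks, hLSne, _⟩ := LS_spec vd hnd hlen hsent (pvNm vd i) hia
    obtain ⟨j, hjn, hji⟩ := (mem_ks vd _).mp hLSks
    have hjne : j ≠ i := by
      intro h; rw [← hji, h] at hLSne; exact hLSne rfl
    have hpc : policy_compare_port (pvNm vd i) (least_similar_port (pvNm vd i) vd) vd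
        = pvD vd i j := by
      rw [← hji, pcp_eq_pvD vd hnd hlen i j hi hjn]
    constructor
    · rw [hpc]; exact h_ge' i j (by omega) hi hjn
    · intro hip; rw [hpc]; exact G1' i j (by omega) hi hjn (Or.inl hip)
  -- A's outer loop
  rw [A_eq_run vd hnd, hB]
  have hksp : p < (vd.map Prod.fst).length := by omega
  have hget_p : (vd.map Prod.fst)[p] = pvNm vd p := by
    rw [pvNm_eq_getElem vd p hpn, List.getElem_map]
  have hksA : vd.map Prod.fst
      = (vd.map Prod.fst).take p ++ pvNm vd p :: (vd.map Prod.fst).drop (p + 1) := by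
    conv_lhs => rw [← List.take_append_drop p (vd.map Prod.fst),
      List.drop_eq_getElem_cons hksp]
    rw [hget_p]
  rw [hksA, List.map_append, List.map_cons]
  have hmid : (policy_compare_port (pvNm vd p) (least_similar_port (pvNm vd p) vd) vd,
      some (pvNm vd p, least_similar_port (pvNm vd p) vd))
      = (m, some (pvNm vd p, pvNm vd q)) := by
    rw [hLSp, pcp_eq_pvD vd hnd hlen p q hpn hqn, hDpq]
  rw [hmid]
  have hrA : pvRun (100000, (none : Option (String × String)))
      ((((vd.map Prod.fst).take p).map (fun a =>
          (policy_compare_port a (least_similar_port a vd) vd,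
           some (a, least_similar_port a vd)))) ++
        (m, some (pvNm vd p, pvNm vd q)) ::
        (((vd.map Prod.fst).drop (p + 1)).map (fun a =>
          (policy_compare_port a (least_similar_port a vd) vd,
           some (a, least_similar_port a vd)))))
      = (m, some (pvNm vd p, pvNm vd q)) := by
    apply pvRun_exact
    · intro y hy
      obtain ⟨b, hbt, rfl⟩ := List.mem_map.mp hy
      obtain ⟨i, hiq, hib⟩ := List.mem_take_iff_getElem.mp hbt
      have hip : i < p := lt_of_lt_of_le hiq (min_le_left _ _)
      have hin : i < vd.length := by omega
      have hbi : b = pvNm vd i := by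
        rw [← hib, pvNm_eq_getElem vd i hin, List.getElem_map]
      show m < (policy_compare_port b (least_similar_port b vd) vd,
        some (b, least_similar_port b vd)).1
      rw [hbi]
      exact (hval i hin).2 hip
    · intro y hy
      obtain ⟨b, hbt, rfl⟩ := List.mem_map.mp hy
      have hbks : b ∈ vd.map Prod.fst := List.mem_of_mem_drop hbt
      obtain ⟨i, hin, hbi⟩ := (mem_ks vd b).mp hbks
      show m ≤ (policy_compare_port b (least_similar_port b vd) vd,
        some (b, least_similar_port b vd)).1
      rw [← hbi]
      exact (hval i hin).1
    · show m < (100000 : Int)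
      omega
  rw [hrA]
  rfl

-- ===== VERDICT (by name: the statement is the Claim_ definition above) =====
theorem bitter_rivals_spec : Claim_equal_bitter_rivals := by
  intro vd _ hpre
  unfold Spec_bitter_rivals
  exact bitter_rivals_main vd hpre
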